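-- pv_equiv track=rewrite | github.com/rswizi/noe_spell_creator | server/src/modules/quests_api.py | _apply_tracking
-- ===== SOURCE A (Python) =====
-- def _apply_tracking(existing: list[str], username: str, action: str) -> list[str]:
--     clean = [entry for entry in (existing or []) if entry]
--     normalized = []
--     seen = set()
--     for entry in clean:
--         low = entry.lower()
--         if low not in seen:
--             seen.add(low)
--             normalized.append(entry)
--     lower_user = username.lower()
--     if action == "track":
--         if lower_user not in {name.lower() for name in normalized}:
--             normalized.append(username)
--     elif action == "untrack":
--         normalized = [entry for entry in normalized if entry.lower() != lower_user]
--     return normalized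
-- ===== SOURCE B (Python) =====
-- def _apply_tracking(existing: list[str], username: str, action: str) -> list[str]:
--     lower_user = username.lower()
--     seen = set()
--     if action == "untrack":
--         seen.add(lower_user)  # matching entries are dropped during the dedup pass
--     result = []
--     for entry in (existing or []):
--         if not entry:
--             continue
--         low = entry.lower()
--         if low not in seen:
--             seen.add(low)
--             result.append(entry)
--     if action == "track" and lower_user not in seen:
--         result.append(username)
--     return result
-- ===== Notes on version B (the rewrite author's own statement) =====
-- stated objective: simpler
-- what changed: Single pass with a pre-seeded seen set: the untrack filter and the track membership test are folded into the one dedup loop, removing the two extra comprehensions and the second lowercasing pass.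
import Mathlib
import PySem

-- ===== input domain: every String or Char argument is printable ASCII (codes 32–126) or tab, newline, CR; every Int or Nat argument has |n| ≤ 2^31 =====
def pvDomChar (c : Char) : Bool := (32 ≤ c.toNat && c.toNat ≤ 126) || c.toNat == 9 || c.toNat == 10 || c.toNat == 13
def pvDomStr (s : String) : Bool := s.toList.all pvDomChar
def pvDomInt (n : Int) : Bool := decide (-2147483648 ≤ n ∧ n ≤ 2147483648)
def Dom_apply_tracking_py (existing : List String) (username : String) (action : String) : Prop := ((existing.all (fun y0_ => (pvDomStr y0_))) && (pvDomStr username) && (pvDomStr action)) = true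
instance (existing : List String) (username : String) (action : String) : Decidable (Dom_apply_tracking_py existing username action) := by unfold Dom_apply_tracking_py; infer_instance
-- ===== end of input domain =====

-- B merges A's untrack filter and track membership test into the single dedup pass via a pre-seeded seen set (objective: simpler).

-- shared dedup step: both Pythons contain 'low = entry.lower(); if low not in seen: seen.add(low); out.append(entry)'
def pvStep (p : List String × PySem.Set String) (entry : String) : List String × PySem.Set String :=
  let low := PySem.Str.lower entry
  if PySem.Set.contains p.2 low then p else (p.1 ++ [entry], PySem.Set.add p.2 low)

-- ===== PORT A =====
def apply_tracking_py (existing : List String) (username : String) (action : String) : List String :=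
  -- 'existing or []' iterates the same elements as 'existing' (an empty list is falsy → [])
  let clean := existing.filter (fun entry => entry ≠ "")
  let p := clean.foldl pvStep ([], PySem.Set.empty)
  let normalized := p.1
  let lower_user := PySem.Str.lower username
  if action == "track" then
    -- '{name.lower() for name in normalized}' is only used for a membership test, exact as a Set
    if !(PySem.Set.contains (PySem.Set.ofList (normalized.map PySem.Str.lower)) lower_user) then
      normalized ++ [username]
    else normalized
  else if action == "untrack" then
    normalized.filter (fun entry => PySem.Str.lower entry ≠ lower_user)
  else normalized

-- ===== PORT B =====
def apply_tracking_py_alt (existing : List String) (username : String) (action : String) : List String :=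
  let lower_user := PySem.Str.lower username
  let seen0 : PySem.Set String :=
    if action == "untrack" then PySem.Set.add PySem.Set.empty lower_user else PySem.Set.empty
  let p := existing.foldl (fun p entry => if entry = "" then p else pvStep p entry) ([], seen0)
  if (action == "track") && !(PySem.Set.contains p.2 lower_user) then p.1 ++ [username] else p.1

-- ===== PRECONDITION & SPEC =====
def Spec_apply_tracking_py (existing : List String) (username : String) (action : String) (out : List String) : Prop := out = apply_tracking_py_alt existing username action
instance (existing : List String) (username : String) (action : String) (out : List String) : Decidable (Spec_apply_tracking_py existing username action out) := by unfold Spec_apply_tracking_py; infer_instance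

-- ===== CLAIM (what is proved, stated in full; the proofs are below) =====
def Claim_equal_apply_tracking_py : Prop := ∀ (existing : List String) (username : String) (action : String), Dom_apply_tracking_py existing username action → Spec_apply_tracking_py existing username action (apply_tracking_py existing username action)

-- ===== LEMMAS AND PROOFS =====

theorem pv_contains (s : PySem.Set String) (x : String) :
    PySem.Set.contains s x = decide (x ∈ s) := by
  simp [PySem.Set.contains, List.contains_eq_mem]

-- the seen set of the dedup fold holds exactly the lowercases of the accumulated result
theorem pvStep_seen (xs : List String) (r : List String) (s : PySem.Set String)
    (h : ∀ x, x ∈ s ↔ ∃ a ∈ r, PySem.Str.lower a = x) :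
    ∀ x, x ∈ (xs.foldl pvStep (r, s)).2 ↔ ∃ a ∈ (xs.foldl pvStep (r, s)).1, PySem.Str.lower a = x := by
  induction xs generalizing r s with
  | nil => simpa using h
  | cons e xs ih =>
    simp only [List.foldl_cons, pvStep, pv_contains]
    by_cases hc : PySem.Str.lower e ∈ s
    · simp only [hc, decide_true, if_pos]
      exact ih r s h
    · simp only [hc, decide_false, Bool.false_eq_true, if_false]
      refine ih _ _ ?_
      intro x
      simp only [PySem.Set.mem_add, h x, List.mem_append, List.mem_singleton]
      constructor
      · rintro (⟨a, ha, rfl⟩ | rfl)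
        · exact ⟨a, Or.inl ha, rfl⟩
        · exact ⟨e, Or.inr rfl, rfl⟩
      · rintro ⟨a, (ha | rfl), rfl⟩
        · exact Or.inl ⟨a, ha, rfl⟩
        · exact Or.inr rfl

-- pre-seeding the seen set with u = running the plain fold and filtering u's entries out afterwards
theorem pvStep_seeded (u : String) (xs : List String) (rA rB : List String) (sA sB : PySem.Set String)
    (hr : rB = rA.filter (fun e => PySem.Str.lower e ≠ u))
    (hs : ∀ x, x ∈ sB ↔ x ∈ sA ∨ x = u) :
    (xs.foldl pvStep (rB, sB)).1
      = ((xs.foldl pvStep (rA, sA)).1).filter (fun e => PySem.Str.lower e ≠ u) := by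
  induction xs generalizing rA rB sA sB with
  | nil => simpa using hr
  | cons e xs ih =>
    simp only [List.foldl_cons, pvStep, pv_contains]
    by_cases hc : PySem.Str.lower e ∈ sA
    · have hcB : PySem.Str.lower e ∈ sB := (hs _).mpr (Or.inl hc)
      simp only [hc, hcB, decide_true, if_pos]
      exact ih rA rB sA sB hr hs
    · simp only [hc, decide_false, Bool.false_eq_true, if_false]
      by_cases he : PySem.Str.lower e = u
      · have hcB : PySem.Str.lower e ∈ sB := (hs _).mpr (Or.inr he)
        simp only [hcB, decide_true, if_pos]
        refine ih (rA ++ [e]) rB (PySem.Set.add sA (PySem.Str.lower e)) sB ?_ ?_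
        · simp [hr, List.filter_append, he]
        · intro x
          simp only [hs x, PySem.Set.mem_add, he]
          tauto
      · have hcB : ¬ PySem.Str.lower e ∈ sB := by
          simp only [hs]; tauto
        simp only [hcB, decide_false, Bool.false_eq_true, if_false]
        refine ih (rA ++ [e]) (rB ++ [e]) _ _ ?_ ?_
        · simp [hr, List.filter_append, he]
        · intro x
          simp only [PySem.Set.mem_add, hs x]
          tauto

-- filtering empties before the fold = skipping them inside the fold
theorem pv_fold_filter (xs : List String) (init : List String × PySem.Set String) :
    (xs.filter (fun e => e ≠ "")).foldl pvStep init
      = xs.foldl (fun p e => if e = "" then p else pvStep p e) init := by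
  induction xs generalizing init with
  | nil => rfl
  | cons e xs ih =>
    by_cases he : e = ""
    · subst he; simpa using ih init
    · have h1 : (decide (e ≠ "")) = true := by simp [he]
      simp only [List.filter_cons, h1, if_pos, List.foldl_cons, he]
      exact ih (pvStep init e)

-- ===== VERDICT (by name: the statement is the Claim_ definition above) =====
theorem apply_tracking_py_spec : Claim_equal_apply_tracking_py := by
  intro existing username action _
  unfold Spec_apply_tracking_py apply_tracking_py apply_tracking_py_alt
  simp only [← pv_fold_filter]
  by_cases ht : action = "track"
  · subst ht
    have hif : (("track" : String) == "untrack") = false := by rfl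
    have hseen := pvStep_seen (existing.filter (fun e => e ≠ "")) [] PySem.Set.empty
      (by intro x; simp [PySem.Set.empty])
    simp only [hif, Bool.false_eq_true, if_false, beq_self_eq_true, if_pos, Bool.true_and]
    have hc : PySem.Set.contains
        (PySem.Set.ofList (((existing.filter (fun e => e ≠ "")).foldl pvStep
          ([], PySem.Set.empty)).1.map PySem.Str.lower)) (PySem.Str.lower username)
        = PySem.Set.contains ((existing.filter (fun e => e ≠ "")).foldl pvStep
          ([], PySem.Set.empty)).2 (PySem.Str.lower username) := by
      rw [pv_contains, pv_contains, decide_eq_decide]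
      rw [PySem.Set.mem_ofList, List.mem_map, hseen]
    rw [hc]
  · have htb : (action == "track") = false := by simp [ht]
    by_cases hu : action = "untrack"
    · subst hu
      simp only [htb, Bool.false_and, Bool.false_eq_true, if_false, beq_self_eq_true, if_pos]
      exact (pvStep_seeded (PySem.Str.lower username) _ [] [] PySem.Set.empty _
        (by simp)
        (by intro x; simp [PySem.Set.empty])).symm
    · have hub : (action == "untrack") = false := by simp [hu]
      simp [htb, hub]
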